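-- pv_equiv track=rewrite | github.com/oamg/leapp-repository | repos/system_upgrade/el8toel9/actors/firewalldcollectusedobjectnames/libraries/private_firewalldcollectusedobjectnames.py | get_used_services
-- ===== SOURCE A (Python) =====
-- def get_used_services(conf, isZone):
--     used_services = set()
--
--     for service in conf.get('services', []):
--         used_services.add(service)
--
--     # Also need to look for 'service name="<service>"' in rich rules. The rule
--     # strings are normalized by firewalld. zone keyword is 'rules_str'. policy
--     # keyword is 'rich_rules'.
--     for rule in conf.get('rules_str', []) if isZone else conf.get('rich_rules', []):
--         try:
--             search = 'service name="'
--             start = rule.index(search) + len(search)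
--             stop = rule[start:].index('"')
--             used_services.add(rule[start:start+stop])
--         except ValueError:
--             pass
--
--     return used_services
-- ===== SOURCE B (Python) =====
-- def get_used_services(conf, isZone):
--     used_services = set(conf.get('services', []))
--
--     # Quote-segment scan: split the rule at every '"'. An occurrence of
--     # 'service name="' is exactly a segment ending with 'service name=' that is
--     # followed by a further quote; the service name is then the next segment.
--     for rule in conf.get('rules_str', []) if isZone else conf.get('rich_rules', []):
--         parts = rule.split('"')
--         for i in range(len(parts) - 2):
--             if parts[i].endswith('service name='):
--                 used_services.add(parts[i + 1])
--                 break
--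
--     return used_services
-- ===== Notes on version B (the rewrite author's own statement) =====
-- stated objective: alternative
-- what changed: Instead of searching for the substring 'service name="' with .index and slicing by index arithmetic under try/except, B splits each rule at every '"' and scans adjacent quote-delimited segments: a segment ending with 'service name=' followed by a further quote yields the next segment as the service name; the services list is absorbed via the set() constructor.
import Mathlib
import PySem

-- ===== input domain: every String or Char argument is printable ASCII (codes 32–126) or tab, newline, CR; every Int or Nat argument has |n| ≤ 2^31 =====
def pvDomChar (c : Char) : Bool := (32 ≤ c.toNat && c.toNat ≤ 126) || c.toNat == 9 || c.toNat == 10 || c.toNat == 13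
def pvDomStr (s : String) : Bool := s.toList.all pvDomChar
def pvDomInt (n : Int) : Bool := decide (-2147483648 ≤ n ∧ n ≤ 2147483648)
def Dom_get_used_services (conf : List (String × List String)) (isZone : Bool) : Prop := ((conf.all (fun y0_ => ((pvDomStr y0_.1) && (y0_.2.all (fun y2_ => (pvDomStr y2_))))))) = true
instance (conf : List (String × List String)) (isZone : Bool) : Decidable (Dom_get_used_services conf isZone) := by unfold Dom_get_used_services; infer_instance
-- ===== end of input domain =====

-- B replaces A's substring search with index arithmetic and try/except by a quote-segment
-- decomposition: split each rule at '"' and scan adjacent segments; objective: alternative, same cost.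

-- ===== PORT A =====
-- per-rule body of A's second loop: 'service name="' searched with .index (ValueError → skip),
-- then '"' searched in the remainder; on success the slice rule[start:start+stop] is added.
def pvExtractA (rule : String) : Option String :=
  let search := "service name=\""
  let i := PySem.Str.find rule search
  if i = -1 then none
  else
    let start : Int := i + (PySem.Str.len search : Int)
    let rest := PySem.Str.slice rule (some start) none
    let stop := PySem.Str.find rest "\""
    if stop = -1 then none
    else some (PySem.Str.slice rule (some start) (some (start + stop)))

def get_used_services (conf : List (String × List String)) (isZone : Bool) : List String :=
  let used : PySem.Set String :=
    (PySem.Dict.getD (PySem.Dict.mk conf) "services" []).foldl (fun s v => PySem.Set.add s v) PySem.Set.empty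
  let rules := if isZone then PySem.Dict.getD (PySem.Dict.mk conf) "rules_str" []
               else PySem.Dict.getD (PySem.Dict.mk conf) "rich_rules" []
  rules.foldl (fun s rule =>
    match pvExtractA rule with
    | some v => PySem.Set.add s v
    | none => s) used

-- ===== PORT B =====
-- inner loop of B: for i in range(len(parts)-2): if parts[i].endswith('service name='): take parts[i+1]; break
def pvScanB : List (List Char) → Option (List Char)
  | p :: q :: r :: rest =>
      if PySem.Chars.endswith p "service name=".toList then some q
      else pvScanB (q :: r :: rest)
  | _ => none

def get_used_services_alt (conf : List (String × List String)) (isZone : Bool) : List String :=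
  let used : PySem.Set String := PySem.Set.ofList (PySem.Dict.getD (PySem.Dict.mk conf) "services" [])
  let rules := if isZone then PySem.Dict.getD (PySem.Dict.mk conf) "rules_str" []
               else PySem.Dict.getD (PySem.Dict.mk conf) "rich_rules" []
  rules.foldl (fun s rule =>
    match pvScanB (PySem.Chars.splitOn rule.toList "\"".toList) with
    | some name => PySem.Set.add s (String.ofList name)
    | none => s) used

-- ===== PRECONDITION & SPEC =====
def Spec_get_used_services (conf : List (String × List String)) (isZone : Bool) (out : List String) : Prop := out = get_used_services_alt conf isZone
instance (conf : List (String × List String)) (isZone : Bool) (out : List String) : Decidable (Spec_get_used_services conf isZone out) := by unfold Spec_get_used_services; infer_instance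

-- ===== CLAIM (what is proved, stated in full; the proofs are below) =====
def Claim_equal_get_used_services : Prop := ∀ (conf : List (String × List String)) (isZone : Bool), Dom_get_used_services conf isZone → Spec_get_used_services conf isZone (get_used_services conf isZone)

-- ===== LEMMAS AND PROOFS =====

-- common reference: leftmost scan for 'service name="', then the chars up to the next '"'
def refExtract : List Char → Option (List Char)
  | [] => none
  | c :: cs =>
    if ("service name=\"".toList).isPrefixOf (c :: cs) then
      let rest := (c :: cs).drop 14
      if '"' ∈ rest then some (rest.takeWhile (· ≠ '"')) else none
    else refExtract cs

-- structural single-character split (reference form of str.split('"'))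
def qsplit (q : Char) : List Char → List (List Char)
  | [] => [[]]
  | c :: cs =>
    if c = q then [] :: qsplit q cs
    else match qsplit q cs with
         | p :: ps => (c :: p) :: ps
         | [] => [[c]]

def mapHead (f : List Char → List Char) : List (List Char) → List (List Char)
  | [] => []
  | p :: ps => f p :: ps

theorem mapHead_id (xs : List (List Char)) : mapHead (fun p => p) xs = xs := by
  cases xs <;> simp [mapHead]

theorem refExtract_cons (c : Char) (cs : List Char) :
    refExtract (c :: cs) =
      if ("service name=\"".toList).isPrefixOf (c :: cs) then
        (if '\"' ∈ (c :: cs).drop 14 then some (((c :: cs).drop 14).takeWhile (· ≠ '\"')) else none)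
      else refExtract cs := rfl

theorem qsplit_ne_nil (q : Char) (cs : List Char) : qsplit q cs ≠ [] := by
  cases cs with
  | nil => simp [qsplit]
  | cons c cs =>
    simp only [qsplit]
    split_ifs
    · simp
    · cases h : qsplit q cs <;> simp

theorem singleton_prefix_iff (q : Char) (l : List Char) :
    [q] <+: l ↔ ∃ t, l = q :: t := by
  constructor
  · rintro ⟨t, rfl⟩; exact ⟨t, rfl⟩
  · rintro ⟨t, rfl⟩; exact ⟨t, rfl⟩

theorem singleton_infix_iff_mem (q : Char) (l : List Char) :
    [q] <:+: l ↔ q ∈ l := by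
  constructor
  · intro h; exact h.sublist.subset (by simp)
  · intro h
    obtain ⟨s, t, rfl⟩ := List.append_of_mem h
    exact ⟨s, t, by simp⟩

-- go of PySem.Chars.splitOn on a single-char separator equals qsplit
theorem splitOn_go_eq (q : Char) :
    ∀ (fuel : Nat) (l : List Char), l.length < fuel → ∀ (cur : List Char) (acc : List (List Char)),
      PySem.Chars.splitOn.go [q] fuel l cur acc = acc.reverse ++ mapHead (fun p => cur.reverse ++ p) (qsplit q l) := by
  intro fuel
  induction fuel with
  | zero => intro l hl; omega
  | succ fuel ih =>
    intro l hl cur acc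
    cases l with
    | nil =>
      rw [PySem.Chars.splitOn.go]
      simp [qsplit, mapHead]
      omega
    | cons c rest =>
      rw [PySem.Chars.splitOn.go]
      by_cases hc : c = q
      · subst hc
        have hpre : List.isPrefixOf [c] (c :: rest) = true := by
          simp [List.isPrefixOf]
        simp only [hpre, if_true, List.length_cons, List.length_nil, List.drop_succ_cons, List.drop_zero]
        rw [ih rest (by simpa using Nat.lt_of_succ_lt_succ hl) [] (cur.reverse :: acc)]
        simp [qsplit, mapHead]
        cases qsplit c rest <;> rfl
      · have hpre : List.isPrefixOf [q] (c :: rest) = false := by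
          simp [List.isPrefixOf]
          intro h; exact absurd h.symm hc
        simp only [hpre, Bool.false_eq_true, if_false]
        rw [ih rest (by simpa using Nat.lt_of_succ_lt_succ hl) (c :: cur) acc]
        obtain ⟨p, ps, hps⟩ : ∃ p ps, qsplit q rest = p :: ps := by
          cases h : qsplit q rest with
          | nil => exact absurd h (qsplit_ne_nil q rest)
          | cons p ps => exact ⟨p, ps, rfl⟩
        simp [qsplit, hc, hps, mapHead]

theorem splitOn_eq_qsplit (q : Char) (cs : List Char) :
    PySem.Chars.splitOn cs [q] = qsplit q cs := by
  unfold PySem.Chars.splitOn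
  rw [splitOn_go_eq q (cs.length + 1) cs (by omega) [] []]
  simp [mapHead_id]

theorem qsplit_of_not_mem {q : Char} {cs : List Char} (h : q ∉ cs) : qsplit q cs = [cs] := by
  induction cs with
  | nil => rfl
  | cons c rest ih =>
    have hc : ¬ c = q := fun hc => h (hc ▸ List.mem_cons_self ..)
    have := ih (fun hm => h (List.mem_cons_of_mem _ hm))
    simp [qsplit, hc, this]

theorem qsplit_append {q : Char} {p0 tail : List Char} (h : q ∉ p0) :
    qsplit q (p0 ++ q :: tail) = p0 :: qsplit q tail := by
  induction p0 with
  | nil => simp [qsplit]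
  | cons c p0' ih =>
    have hc : ¬ c = q := fun hc => h (hc ▸ List.mem_cons_self ..)
    have := ih (fun hm => h (List.mem_cons_of_mem _ hm))
    simp [qsplit, hc, this]

-- a refutation: no occurrence of 'service name="' at all means refExtract gives none
theorem refExtract_of_not_infix {cs : List Char}
    (h : ¬ ("service name=\"".toList) <:+: cs) : refExtract cs = none := by
  induction cs with
  | nil => rfl
  | cons c rest ih =>
    rw [refExtract_cons]
    have hp : ¬ (("service name=\"".toList).isPrefixOf (c :: rest) = true) := by
      intro hb
      exact h (List.IsPrefix.isInfix (List.isPrefixOf_iff_prefix.mp hb))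
    have hrest : ¬ ("service name=\"".toList) <:+: rest := fun hi => h (hi.trans (List.suffix_cons c rest).isInfix)
    rw [if_neg hp]
    exact ih hrest

theorem refExtract_drop (k : Nat) (cs : List Char)
    (h : ∀ i, i < k → ¬ ("service name=\"".toList) <+: cs.drop i) :
    refExtract cs = refExtract (cs.drop k) := by
  induction k generalizing cs with
  | zero => simp
  | succ k ih =>
    cases cs with
    | nil => simp
    | cons c rest =>
      rw [refExtract_cons]
      have hp : ¬ (("service name=\"".toList).isPrefixOf (c :: rest) = true) := by
        intro hb
        exact h 0 (Nat.succ_pos k) (by simpa using List.isPrefixOf_iff_prefix.mp hb)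
      rw [if_neg hp]
      simp only [List.drop_succ_cons]
      exact ih rest (fun i hi => by simpa using h (i + 1) (by omega))

theorem refExtract_at {cs : List Char} (h : ("service name=\"".toList) <+: cs) :
    refExtract cs = (if '"' ∈ cs.drop 14 then some ((cs.drop 14).takeWhile (· ≠ '"')) else none) := by
  cases cs with
  | nil => simp at h
  | cons c rest =>
    rw [refExtract_cons]
    rw [if_pos (List.isPrefixOf_iff_prefix.mpr h)]

-- first index of '"' cuts the list exactly at takeWhile (· ≠ '"')
theorem take_first_eq_takeWhile (q : Char) :
    ∀ (j : Nat) (l : List Char), (∀ i, i < j → ¬ [q] <+: l.drop i) → [q] <+: l.drop j →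
      l.take j = l.takeWhile (· ≠ q) := by
  intro j
  induction j with
  | zero =>
    intro l _ hj
    simp only [List.drop_zero] at hj
    obtain ⟨t, rfl⟩ := (singleton_prefix_iff q l).mp hj
    simp [List.takeWhile]
  | succ j ih =>
    intro l hmin hj
    cases l with
    | nil => simp at hj
    | cons c l' =>
      have hc : c ≠ q := by
        intro hc
        subst hc
        exact hmin 0 (Nat.succ_pos j) (by rw [List.drop_zero]; exact ⟨l', rfl⟩)
      have := ih l' (fun i hi => by simpa using hmin (i + 1) (by omega)) (by simpa using hj)
      simp [List.takeWhile, hc, this]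

-- ===== A = refExtract =====
set_option maxHeartbeats 1000000 in
theorem A_eq_ref (rule : String) :
    pvExtractA rule = (refExtract rule.toList).map String.ofList := by
  unfold pvExtractA
  simp only [PySem.Str.find_eq, PySem.Str.len_eq]
  by_cases hinf : ("service name=\"".toList) <:+: rule.toList
  · have hnn : 0 ≤ PySem.Chars.find rule.toList "service name=\"".toList :=
      (PySem.Chars.find_nonneg_iff _ _).mpr hinf
    obtain ⟨h1, h2⟩ := PySem.Chars.find_spec hnn
    set k := (PySem.Chars.find rule.toList "service name=\"".toList).toNat with hk
    have hkc : PySem.Chars.find rule.toList "service name=\"".toList = (k : Int) := by omega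
    rw [hkc]
    rw [if_neg (by omega : ¬((k : Int) = -1))]
    have hcast : (k : Int) + (("service name=\"".toList).length : Int)
        = ((k + 14 : Nat) : Int) := by
      have : ("service name=\"".toList).length = 14 := by decide
      rw [this]; push_cast; ring
    have hrest : (PySem.Str.slice rule (some ((k : Int) + (("service name=\"".toList).length : Int))) none).toList
        = rule.toList.drop (k + 14) := by
      rw [PySem.Str.toList_slice, PySem.Chars.slice_eq_listSlice, hcast,
        PySem.List.slice_from_natCast]
    rw [hrest]
    have href : refExtract rule.toList
        = (if '"' ∈ (rule.toList.drop k).drop 14 then some (((rule.toList.drop k).drop 14).takeWhile (· ≠ '"')) else none) := by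
      rw [refExtract_drop k rule.toList h2]
      exact refExtract_at h1
    rw [List.drop_drop] at href
    by_cases hq : ('"' ∈ rule.toList.drop (k + 14))
    · have hinf2 : ['"'] <:+: rule.toList.drop (k + 14) := (singleton_infix_iff_mem _ _).mpr hq
      have hfq : "\"".toList = ['"'] := by decide
      have hnn2 : 0 ≤ PySem.Chars.find (rule.toList.drop (k + 14)) "\"".toList := by
        rw [hfq]; exact (PySem.Chars.find_nonneg_iff _ _).mpr hinf2
      obtain ⟨g1, g2⟩ := PySem.Chars.find_spec hnn2
      set j := (PySem.Chars.find (rule.toList.drop (k + 14)) "\"".toList).toNat with hj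
      have hjc : PySem.Chars.find (rule.toList.drop (k + 14)) "\"".toList = (j : Int) := by omega
      rw [hjc]
      rw [if_neg (by omega : ¬((j : Int) = -1))]
      rw [hfq] at g1 g2
      have htw : (rule.toList.drop (k + 14)).take j = (rule.toList.drop (k + 14)).takeWhile (· ≠ '"') :=
        take_first_eq_takeWhile '"' j _ g2 g1
      have hcast2 : (k : Int) + (("service name=\"".toList).length : Int) + (j : Int)
          = ((k + 14 + j : Nat) : Int) := by
        have : ("service name=\"".toList).length = 14 := by decide
        rw [this]; push_cast; ring
      have hsl : (PySem.Str.slice rule (some ((k : Int) + (("service name=\"".toList).length : Int)))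
          (some ((k : Int) + (("service name=\"".toList).length : Int) + (j : Int)))).toList
          = (rule.toList.drop (k + 14)).take j := by
        rw [PySem.Str.toList_slice, PySem.Chars.slice_eq_listSlice, hcast2, hcast,
          PySem.List.slice_natCast]
        congr 1
        omega
      rw [href, if_pos hq]
      have : PySem.Str.slice rule (some ((k : Int) + (("service name=\"".toList).length : Int)))
          (some ((k : Int) + (("service name=\"".toList).length : Int) + (j : Int)))
          = String.ofList ((rule.toList.drop (k + 14)).takeWhile (· ≠ '"')) := by
        have := congrArg String.ofList hsl
        rw [String.ofList_toList] at this
        rw [this, htw]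
      rw [this]
      simp [Option.map]
    · have hfq : "\"".toList = ['"'] := by decide
      have hne : ¬ (['"'] <:+: rule.toList.drop (k + 14)) :=
        fun hi => hq ((singleton_infix_iff_mem _ _).mp hi)
      have : PySem.Chars.find (rule.toList.drop (k + 14)) "\"".toList = -1 := by
        rw [hfq]; exact (PySem.Chars.find_eq_neg_one_iff _ _).mpr hne
      rw [this, if_pos rfl, href, if_neg hq]
      simp [Option.map]
  · have hf : PySem.Chars.find rule.toList "service name=\"".toList = -1 :=
      (PySem.Chars.find_eq_neg_one_iff _ _).mpr hinf
    rw [hf, if_pos rfl, refExtract_of_not_infix hinf]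
    simp [Option.map]

-- ===== B = refExtract =====
-- prefix of the whole only at the segment boundary: pat ++ [q] prefixes p0 ++ q :: tail iff p0 = pat
theorem pat_prefix_boundary (q : Char) :
    ∀ (p0 pat tail : List Char), q ∉ p0 → q ∉ pat →
      ((pat ++ [q]) <+: (p0 ++ q :: tail) ↔ p0 = pat) := by
  intro p0
  induction p0 with
  | nil =>
    intro pat tail _ hqpat
    cases pat with
    | nil => simp
    | cons a pat' =>
      simp only [List.nil_append, List.cons_append, List.cons_prefix_cons]
      constructor
      · rintro ⟨rfl, -⟩; exact absurd (List.mem_cons_self ..) hqpat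
      · intro h; exact absurd h.symm (by simp)
  | cons c p0' ih =>
    intro pat tail hqp0 hqpat
    cases pat with
    | nil =>
      simp only [List.nil_append, List.cons_append, List.cons_prefix_cons]
      constructor
      · rintro ⟨heq, -⟩; exact absurd heq.symm (fun h => hqp0 (h ▸ List.mem_cons_self ..))
      · intro h; exact absurd h (by simp)
    | cons a pat' =>
      simp only [List.cons_append, List.cons_prefix_cons]
      rw [ih pat' tail (fun hm => hqp0 (List.mem_cons_of_mem _ hm)) (fun hm => hqpat (List.mem_cons_of_mem _ hm))]
      constructor
      · rintro ⟨rfl, rfl⟩; rfl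
      · intro hx; injection hx with h1 h2; exact ⟨h1.symm, h2⟩

theorem refExtract_boundary (p0 tail : List Char) (h : '"' ∉ p0) :
    refExtract (p0 ++ '"' :: tail) =
      if ("service name=".toList) <:+ p0 then
        (if '"' ∈ tail then some (tail.takeWhile (· ≠ '"')) else none)
      else refExtract tail := by
  have hqpat : '"' ∉ "service name=".toList := by decide
  have hsplit : "service name=\"".toList = "service name=".toList ++ ['"'] := by decide
  induction p0 with
  | nil =>
    have hp : ¬ (("service name=\"".toList).isPrefixOf ('"' :: tail) = true) := by
      intro hb
      have := List.isPrefixOf_iff_prefix.mp hb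
      rw [show ("service name=\"".toList) = 's' :: "ervice name=\"".toList from rfl] at this
      rw [List.cons_prefix_cons] at this
      exact absurd this.1 (by decide)
    have hsfx : ¬ ("service name=".toList <:+ ([] : List Char)) := by
      rw [List.suffix_nil]
      decide
    show refExtract ('"' :: tail) = _
    rw [refExtract_cons, if_neg hp, if_neg hsfx]
  | cons c p0' ih =>
    have hq' : '"' ∉ p0' := fun hm => h (List.mem_cons_of_mem _ hm)
    by_cases hpat : (c :: p0') = "service name=".toList
    · have hpre : ("service name=\"".toList) <+: ((c :: p0') ++ '"' :: tail) := by
        rw [hsplit, hpat]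
        exact ⟨tail, by simp⟩
      rw [refExtract_at hpre]
      have hdrop : ((c :: p0') ++ '"' :: tail).drop 14 = tail := by
        have h14 : ((c :: p0') ++ ['"']).length = 14 := by
          rw [hpat]; decide
        calc ((c :: p0') ++ '"' :: tail).drop 14
            = (((c :: p0') ++ ['"']) ++ tail).drop (((c :: p0') ++ ['"']).length) := by
              rw [h14]; simp
          _ = tail := by rw [List.drop_left]
      have hsuf : ("service name=".toList) <:+ (c :: p0') := by
        rw [hpat]
      rw [hdrop, if_pos hsuf]
    · have hp : ¬ (("service name=\"".toList).isPrefixOf (c :: (p0' ++ '"' :: tail)) = true) := by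
        intro hb
        have := List.isPrefixOf_iff_prefix.mp hb
        rw [hsplit] at this
        exact hpat ((pat_prefix_boundary '"' (c :: p0') "service name=".toList tail h hqpat).mp this)
      have hbody : refExtract (p0' ++ '"' :: tail)
          = if ("service name=".toList) <:+ p0' then
              (if '"' ∈ tail then some (tail.takeWhile (· ≠ '"')) else none)
            else refExtract tail := ih hq'
      have hsfx : ("service name=".toList <:+ (c :: p0')) ↔ ("service name=".toList <:+ p0') := by
        rw [List.suffix_cons_iff]
        constructor
        · rintro (heq | hs)
          · exact absurd heq.symm hpat
          · exact hs
        · exact Or.inr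
      show refExtract (c :: (p0' ++ '\"' :: tail))
          = if ("service name=".toList) <:+ (c :: p0') then
              (if '\"' ∈ tail then some (tail.takeWhile (· ≠ '\"')) else none)
            else refExtract tail
      rw [refExtract_cons, if_neg hp]
      rw [hbody]
      by_cases hs : ("service name=".toList <:+ p0')
      · rw [if_pos hs, if_pos (hsfx.mpr hs)]
      · rw [if_neg hs, if_neg (fun hx => hs (hsfx.mp hx))]

theorem dropWhile_eq_cons_head {α : Type} (p : α → Bool) (l : List α) (d : α) (t : List α)
    (h : l.dropWhile p = d :: t) : p d = false := by
  induction l with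
  | nil => simp [List.dropWhile] at h
  | cons a l ih =>
    rw [List.dropWhile_cons] at h
    by_cases hp : p a = true
    · rw [if_pos hp] at h
      exact ih h
    · rw [if_neg hp] at h
      injection h with h1 _
      subst h1
      simpa using hp

theorem infix_pat_mem {cs : List Char} (h : ("service name=\"".toList) <:+: cs) : '"' ∈ cs :=
  h.sublist.subset (by decide)

theorem B_eq_ref : ∀ (n : Nat) (cs : List Char), cs.length ≤ n →
    pvScanB (qsplit '"' cs) = refExtract cs := by
  intro n
  induction n with
  | zero =>
    intro cs hl
    have : cs = [] := List.eq_nil_of_length_eq_zero (by omega)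
    subst this
    rfl
  | succ n ih =>
    intro cs hl
    by_cases hq : '"' ∈ cs
    · set p0 := cs.takeWhile (· ≠ '"') with hp0
      have hqp0 : '"' ∉ p0 := by
        intro hm
        have := List.mem_takeWhile_imp hm
        simp at this
      have hdw : cs.dropWhile (· ≠ '"') ≠ [] := by
        intro hnil
        have : cs = p0 := by
          conv_lhs => rw [← List.takeWhile_append_dropWhile (p := (· ≠ '"')) (l := cs)]
          rw [hnil, List.append_nil]
        exact hqp0 (this ▸ hq)
      obtain ⟨d, tail, hd⟩ : ∃ d tail, cs.dropWhile (· ≠ '"') = d :: tail := by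
        cases hx : cs.dropWhile (· ≠ '"') with
        | nil => exact absurd hx hdw
        | cons d tail => exact ⟨d, tail, rfl⟩
      have hdq : d = '"' := by
        have := dropWhile_eq_cons_head (· ≠ '"') cs d tail hd
        simpa using this
      have hcs : cs = p0 ++ '"' :: tail := by
        conv_lhs => rw [← List.takeWhile_append_dropWhile (p := (· ≠ '"')) (l := cs)]
        rw [hd, hdq]
      have hlen : tail.length < cs.length := by
        rw [hcs]; simp; omega
      rw [hcs, qsplit_append hqp0, refExtract_boundary p0 tail hqp0]
      by_cases hq2 : '"' ∈ tail
      · set t0 := tail.takeWhile (· ≠ '"') with ht0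
        have hqt0 : '"' ∉ t0 := by
          intro hm
          have := List.mem_takeWhile_imp hm
          simp at this
        have hdw2 : tail.dropWhile (· ≠ '"') ≠ [] := by
          intro hnil
          have : tail = t0 := by
            conv_lhs => rw [← List.takeWhile_append_dropWhile (p := (· ≠ '"')) (l := tail)]
            rw [hnil, List.append_nil]
          exact hqt0 (this ▸ hq2)
        obtain ⟨d2, tail2, hd2⟩ : ∃ d2 tail2, tail.dropWhile (· ≠ '"') = d2 :: tail2 := by
          cases hx : tail.dropWhile (· ≠ '"') with
          | nil => exact absurd hx hdw2
          | cons d2 tail2 => exact ⟨d2, tail2, rfl⟩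
        have hd2q : d2 = '"' := by
          have := dropWhile_eq_cons_head (· ≠ '"') tail d2 tail2 hd2
          simpa using this
        have htail : tail = t0 ++ '"' :: tail2 := by
          conv_lhs => rw [← List.takeWhile_append_dropWhile (p := (· ≠ '"')) (l := tail)]
          rw [hd2, hd2q]
        obtain ⟨s, ss, hss⟩ : ∃ s ss, qsplit '"' tail2 = s :: ss := by
          cases hx : qsplit '"' tail2 with
          | nil => exact absurd hx (qsplit_ne_nil _ _)
          | cons s ss => exact ⟨s, ss, rfl⟩
        have hqtail : qsplit '"' tail = t0 :: s :: ss := by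
          rw [htail, qsplit_append hqt0, hss]
        rw [hqtail]
        have hscan : pvScanB (p0 :: t0 :: s :: ss)
            = if PySem.Chars.endswith p0 "service name=".toList then some t0
              else pvScanB (t0 :: s :: ss) := rfl
        rw [hscan]
        have hend : PySem.Chars.endswith p0 "service name=".toList = true
            ↔ ("service name=".toList <:+ p0) := PySem.Chars.endswith_iff _ _
        by_cases hsfx : ("service name=".toList <:+ p0)
        · rw [if_pos (hend.mpr hsfx), if_pos hsfx, if_pos hq2, ht0]
        · have : PySem.Chars.endswith p0 "service name=".toList = false := by
            cases hx : PySem.Chars.endswith p0 "service name=".toList with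
            | false => rfl
            | true => exact absurd (hend.mp hx) hsfx
          rw [this]
          simp only [Bool.false_eq_true, if_false]
          rw [if_neg hsfx, ← hqtail, ih tail (by omega)]
      · have hqt : qsplit '"' tail = [tail] := qsplit_of_not_mem hq2
        rw [hqt]
        have hscan : pvScanB [p0, tail] = none := rfl
        rw [hscan]
        have hrt : refExtract tail = none := by
          apply refExtract_of_not_infix
          intro hi
          exact hq2 (infix_pat_mem hi)
        split_ifs with h1
        · rfl
        · exact hrt.symm
    · rw [qsplit_of_not_mem hq]
      have : pvScanB [cs] = none := rfl
      rw [this]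
      symm
      apply refExtract_of_not_infix
      intro hi
      exact hq (infix_pat_mem hi)

-- per-rule bodies of the two folds agree
theorem body_eq (s : PySem.Set String) (rule : String) :
    (match pvExtractA rule with
     | some v => PySem.Set.add s v
     | none => s)
    = (match pvScanB (PySem.Chars.splitOn rule.toList "\"".toList) with
       | some name => PySem.Set.add s (String.ofList name)
       | none => s) := by
  have hfq : "\"".toList = ['"'] := by decide
  rw [A_eq_ref, hfq, splitOn_eq_qsplit, B_eq_ref rule.toList.length rule.toList (le_refl _)]
  cases refExtract rule.toList <;> simp [Option.map]

-- ===== VERDICT (by name: the statement is the Claim_ definition above) =====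
theorem get_used_services_spec : Claim_equal_get_used_services := by
  intro conf isZone _
  unfold Spec_get_used_services get_used_services get_used_services_alt
  simp only [PySem.Set.ofList]
  congr 1
  funext s rule
  exact body_eq s rule
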